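-- pv_equiv track=rewrite | github.com/atom015/py_boj | 1000번/1952_달팽이2.py | solution
-- ===== SOURCE A (Python) =====
-- def solution(m,n):
--     a = [[0 for _ in range(n)] for _ in range(m)]
--     i,j,num,chk,cnt = 0,-1,1,1,0
--     while n > 0 and m > 0:
--         for _ in range(n):
--             j += chk
--             a[i][j] = num
--             num += 1
--         m -= 1
--         cnt += 1
--         if m == 0 or n == 0:break
--         for _ in range(m):
--             i += chk
--             a[i][j] = num
--             num += 1
--         n -= 1
--         chk *= -1
--         cnt += 1
--     return cnt-1
-- ===== SOURCE B (Python) =====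
-- def solution(m, n):
--     # closed form: the spiral makes one segment per stripe; cnt-1 turns.
--     # empty grid (m or n < 1): no segments, so 0 - 1 = -1, as in A.
--     if m < 1 or n < 1:
--         return -1
--     return 2 * m - 2 if m <= n else 2 * n - 1
-- ===== Notes on version B (the rewrite author's own statement) =====
-- stated objective: faster
-- what changed: Replaced the O(m*n) spiral grid fill and segment counter with a closed-form formula (2*m-2 if m<=n else 2*n-1, -1 for empty grids).
import Mathlib
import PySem

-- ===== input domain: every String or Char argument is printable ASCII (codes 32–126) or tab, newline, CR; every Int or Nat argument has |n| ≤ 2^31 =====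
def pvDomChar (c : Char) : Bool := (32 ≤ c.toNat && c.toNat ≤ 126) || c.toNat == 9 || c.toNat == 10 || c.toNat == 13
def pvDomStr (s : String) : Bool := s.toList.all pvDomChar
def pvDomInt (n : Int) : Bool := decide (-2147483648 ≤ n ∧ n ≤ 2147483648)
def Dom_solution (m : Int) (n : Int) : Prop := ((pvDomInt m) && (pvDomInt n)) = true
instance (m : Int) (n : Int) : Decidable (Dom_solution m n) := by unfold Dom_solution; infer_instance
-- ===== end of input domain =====

-- B replaces A's O(m*n) spiral grid fill with a closed-form count of the spiral's segments (faster, asymptotic).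


-- ===== PORT A =====
-- a[i][j] = v with Python's negative-index wraparound; out-of-range writes never
-- occur on the runs A performs (the spiral stays inside the grid), so they are a no-op here.
def pySet2 (a : List (List Int)) (i j v : Int) : List (List Int) :=
  let i' : Int := if i < 0 then i + a.length else i
  match a[i'.toNat]? with
  | none => a
  | some row =>
      let j' : Int := if j < 0 then j + row.length else j
      a.set i'.toNat (row.set j'.toNat v)

-- the while loop of A; state (a, i, j, num, chk, cnt, m, n); returns the final cnt
def spiralLoop (a : List (List Int)) (i j num chk cnt m n : Int) : Int :=
  if h : n > 0 ∧ m > 0 then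
    -- for _ in range(n): j += chk; a[i][j] = num; num += 1
    let s1 := (PySem.List.pyRange 0 n 1).foldl
      (fun (st : List (List Int) × Int × Int) _ =>
        let j := st.2.1 + chk
        (pySet2 st.1 i j st.2.2, j, st.2.2 + 1)) (a, j, num)
    let a := s1.1
    let j := s1.2.1
    let num := s1.2.2
    let m := m - 1
    let cnt := cnt + 1
    if m = 0 ∨ n = 0 then cnt
    else
      -- for _ in range(m): i += chk; a[i][j] = num; num += 1
      let s2 := (PySem.List.pyRange 0 m 1).foldl
        (fun (st : List (List Int) × Int × Int) _ =>
          let i := st.2.1 + chk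
          (pySet2 st.1 i j st.2.2, i, st.2.2 + 1)) (a, i, num)
      spiralLoop s2.1 s2.2.1 j s2.2.2 (chk * -1) (cnt + 1) m (n - 1)
  else cnt
termination_by m.toNat
decreasing_by omega

def solution (m : Int) (n : Int) : Int :=
  spiralLoop ((PySem.List.pyRange 0 m 1).map
    (fun _ => (PySem.List.pyRange 0 n 1).map (fun _ => (0 : Int)))) 0 (-1) 1 1 0 m n - 1

-- ===== PORT B =====
def solution_alt (m : Int) (n : Int) : Int :=
  if m < 1 ∨ n < 1 then -1
  else if m ≤ n then 2 * m - 2 else 2 * n - 1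

-- ===== PRECONDITION & SPEC =====
def Spec_solution (m : Int) (n : Int) (out : Int) : Prop := out = solution_alt m n
instance (m : Int) (n : Int) (out : Int) : Decidable (Spec_solution m n out) := by unfold Spec_solution; infer_instance

-- ===== CLAIM (what is proved, stated in full; the proofs are below) =====
def Claim_equal_solution : Prop := ∀ (m : Int) (n : Int), Dom_solution m n → Spec_solution m n (solution m n)

-- ===== LEMMAS AND PROOFS =====

-- the loop adds to cnt the number of spiral segments, which depends only on m and n
theorem spiralLoop_eq (k : Nat) : ∀ (m : Int), m.toNat ≤ k →
    ∀ (a : List (List Int)) (i j num chk cnt n : Int),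
    spiralLoop a i j num chk cnt m n =
      cnt + (if m ≤ 0 ∨ n ≤ 0 then 0 else if m ≤ n then 2 * m - 1 else 2 * n) := by
  induction k with
  | zero =>
    intro m hm a i j num chk cnt n
    rw [spiralLoop]
    split_ifs <;> omega
  | succ k ih =>
    intro m hm a i j num chk cnt n
    rw [spiralLoop]
    by_cases h : n > 0 ∧ m > 0
    · rw [dif_pos h]
      simp only []
      rw [ih (m - 1) (by omega)]
      split_ifs <;> omega
    · rw [dif_neg h]
      split_ifs <;> omega

theorem solution_spec' (m n : Int) : solution m n = solution_alt m n := by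
  unfold solution solution_alt
  rw [spiralLoop_eq m.toNat m le_rfl]
  split_ifs <;> omega

-- ===== VERDICT (by name: the statement is the Claim_ definition above) =====
theorem solution_spec : Claim_equal_solution := by
  intro m n _
  unfold Spec_solution
  exact solution_spec' m n
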